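-- pv_equiv track=rewrite | github.com/weixijia/ChatTTS | clone_voice_with_llm.py | smart_text_segmentation
-- ===== SOURCE A (Python) =====
-- def smart_text_segmentation(text, max_len=100):
--     """智能分段文本，尝试在标点符号处分段"""
--     if len(text) <= max_len:
--         return [text]
--
--     # 中文标点符号和英文标点符号
--     punctuations = ["。", "！", "？", "；", "，", ".", "!", "?", ";", ","]
--     segments = []
--     start = 0
--
--     while start < len(text):
--         # 如果剩余文本已经小于最大长度，直接添加
--         if start + max_len >= len(text):
--             segments.append(text[start:])
--             break
--
--         # 尝试在最大长度内找标点符号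
--         end = start + max_len
--         found = False
--
--         # 从最大长度位置向前查找最近的标点符号
--         for i in range(end, start, -1):
--             if i < len(text) and text[i] in punctuations:
--                 segments.append(text[start:i+1])
--                 start = i + 1
--                 found = True
--                 break
--
--         # 如果没找到标点符号，则按最大长度直接分割
--         if not found:
--             segments.append(text[start:end])
--             start = end
--
--     return segments
-- ===== SOURCE B (Python) =====
-- def smart_text_segmentation(text, max_len=100):
--     """Segment text in one forward pass, remembering the last punctuation in the
--     current window and cutting there when the window fills up."""
--     if len(text) <= max_len:
--         return [text]
--
--     punctuations = "\u3002\uff01\uff1f\uff1b\uff0c.!?;,"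
--     segments = []
--     start = 0
--     last_punct = -1
--
--     for i, ch in enumerate(text):
--         if ch in punctuations and i > start:
--             last_punct = i
--         if i == start + max_len:
--             if last_punct > start:
--                 segments.append(text[start:last_punct + 1])
--                 start = last_punct + 1
--             else:
--                 segments.append(text[start:i])
--                 start = i
--
--     if start < len(text):
--         segments.append(text[start:])
--     return segments
-- ===== Notes on version B (the rewrite author's own statement) =====
-- stated objective: faster
-- what changed: A rescans each max_len-window backwards for the nearest punctuation; B makes one forward pass over the text with enumerate, remembering the index of the last punctuation seen inside the current segment, and cuts there the moment the window fills, so the inner backward scan disappears.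
import Mathlib
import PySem

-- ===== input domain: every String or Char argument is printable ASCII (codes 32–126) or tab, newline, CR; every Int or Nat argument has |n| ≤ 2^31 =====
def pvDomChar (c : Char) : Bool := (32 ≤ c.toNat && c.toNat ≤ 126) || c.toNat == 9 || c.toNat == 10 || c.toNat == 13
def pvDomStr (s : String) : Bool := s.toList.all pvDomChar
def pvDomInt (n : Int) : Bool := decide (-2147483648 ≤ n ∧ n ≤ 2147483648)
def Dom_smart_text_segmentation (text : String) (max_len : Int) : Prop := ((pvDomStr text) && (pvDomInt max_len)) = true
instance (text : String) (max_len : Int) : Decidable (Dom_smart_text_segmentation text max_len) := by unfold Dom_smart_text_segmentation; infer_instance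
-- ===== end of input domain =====

-- B replaces A's per-segment backward window scan by one forward pass that remembers the last
-- punctuation index in the current segment (objective: faster, asymptotic O(n) vs O(n*max_len)).


-- ===== PORT A =====
-- A's punctuation list; every entry is a single character, so Python's `text[i] in punctuations`
-- (a 1-char string against a list of 1-char strings) is exactly char membership — ported on chars.
def pvPunctA : List Char := ['。', '！', '？', '；', '，', '.', '!', '?', ';', ',']

-- `i < len(text) and text[i] in punctuations` (text[i] never raises when the left conjunct holds)
def pvCondA (cs : List Char) (i : Int) : Bool :=
  decide (i < (cs.length : Int)) &&
    (match PySem.List.pyGet? cs i with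
     | some c => pvPunctA.contains c
     | none => false)

-- `for i in range(end, start, -1): … break` — n counts the remaining indices of the range
def pvScanA (cs : List Char) (i : Int) : Nat → Option Int
  | 0 => none
  | n + 1 => if pvCondA cs i then some i else pvScanA cs (i - 1) n

-- the while-loop of A; fuel only makes the recursion total (one unit per pass)
def pvLoopA (cs : List Char) (maxLen : Int) : Nat → Int → List String → List String
  | 0, _, acc => acc
  | fuel + 1, start, acc =>
    if start < (cs.length : Int) then
      if (cs.length : Int) ≤ start + maxLen then
        acc ++ [String.ofList (PySem.List.slice cs (some start) none)]
      else
        let e := start + maxLen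
        match pvScanA cs e (e - start).toNat with
        | some i =>
            pvLoopA cs maxLen fuel (i + 1)
              (acc ++ [String.ofList (PySem.List.slice cs (some start) (some (i + 1)))])
        | none =>
            pvLoopA cs maxLen fuel e
              (acc ++ [String.ofList (PySem.List.slice cs (some start) (some e))])
    else acc

def smart_text_segmentation (text : String) (max_len : Int) : List String :=
  let cs := text.toList
  if (cs.length : Int) ≤ max_len then [text]
  else pvLoopA cs max_len (cs.length + 1) 0 []

-- ===== PORT B =====
-- B's punctuation string "。！？；，.!?;," iterated char by char; `ch in punctuations` on a
-- 1-char ch is exactly char membership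
def pvPunctB : List Char := ['。', '！', '？', '；', '，', '.', '!', '?', ';', ',']

-- one iteration of B's for-loop; state = (segments, start, last_punct)
def pvStepB (cs : List Char) (maxLen : Int) (st : List String × Int × Int) (ic : Int × Char) :
    List String × Int × Int :=
  let lastp := if pvPunctB.contains ic.2 ∧ st.2.1 < ic.1 then ic.1 else st.2.2
  if ic.1 = st.2.1 + maxLen then
    if st.2.1 < lastp then
      (st.1 ++ [String.ofList (PySem.List.slice cs (some st.2.1) (some (lastp + 1)))],
       lastp + 1, lastp)
    else
      (st.1 ++ [String.ofList (PySem.List.slice cs (some st.2.1) (some ic.1))], ic.1, lastp)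
  else (st.1, st.2.1, lastp)

def smart_text_segmentation_alt (text : String) (max_len : Int) : List String :=
  let cs := text.toList
  if (cs.length : Int) ≤ max_len then [text]
  else
    let st := (PySem.List.enumerate cs 0).foldl (pvStepB cs max_len) ([], 0, -1)
    if st.2.1 < (cs.length : Int) then
      st.1 ++ [String.ofList (PySem.List.slice cs (some st.2.1) none)]
    else st.1

-- ===== PRECONDITION & SPEC =====
-- Pre_ excludes only the inputs where Python A never returns: on a NONEMPTY text with
-- max_len ≤ 0 (and longer than max_len) the while-loop appends empty slices forever
-- (A diverges there, so there is no value to match).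
def Pre_smart_text_segmentation (text : String) (max_len : Int) : Prop :=
  1 ≤ max_len ∨ (text.toList.length : Int) ≤ max_len ∨ text.toList = []
instance (text : String) (max_len : Int) : Decidable (Pre_smart_text_segmentation text max_len) := by unfold Pre_smart_text_segmentation; infer_instance
def pvWitness_smart_text_segmentation : String × Int := ("hello, world! bye now", 6)

def Spec_smart_text_segmentation (text : String) (max_len : Int) (out : List String) : Prop := out = smart_text_segmentation_alt text max_len
instance (text : String) (max_len : Int) (out : List String) : Decidable (Spec_smart_text_segmentation text max_len out) := by unfold Spec_smart_text_segmentation; infer_instance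

-- ===== CLAIM (what is proved, stated in full; the proofs are below) =====
def Claim_equal_smart_text_segmentation : Prop := ∀ (text : String) (max_len : Int), Dom_smart_text_segmentation text max_len → Pre_smart_text_segmentation text max_len → Spec_smart_text_segmentation text max_len (smart_text_segmentation text max_len)

-- ===== LEMMAS AND PROOFS =====

-- A's backward scan returns an index in the scanned half-open interval (i-n, i]
theorem pvScan_bounds (cs : List Char) (j : Int) :
    ∀ (n : Nat) (i : Int), pvScanA cs i n = some j → i - n < j ∧ j ≤ i := by
  intro n
  induction n with
  | zero => intro i h; cases h
  | succ m ih =>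
      intro i h
      rw [pvScanA] at h
      split at h
      · cases h; constructor <;> push_cast <;> omega
      · have := ih (i - 1) h
        push_cast at this ⊢
        omega

-- a shorter scan from the same top index stops strictly above the hit and finds nothing
theorem pvScan_none (cs : List Char) (j : Int) :
    ∀ (m n : Nat) (i : Int), pvScanA cs i n = some j → (m : Int) ≤ i - j →
      pvScanA cs i m = none := by
  intro m
  induction m with
  | zero => intro n i _ _; rfl
  | succ m ih =>
      intro n i h hm
      have hb := pvScan_bounds cs j n i h
      cases n with
      | zero => cases h
      | succ n =>
          rw [pvScanA] at h
          rw [pvScanA]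
          split at h
          · cases h; push_cast at hm; omega
          · rename_i hc
            rw [if_neg hc]
            exact ih n (i - 1) h (by push_cast at hm ⊢; omega)

-- A's loop condition at an in-range absolute index is char membership
theorem pvCondA_natCast (cs : List Char) (k : Nat) (hk : k < cs.length) :
    pvCondA cs (k : Int) = pvPunctA.contains cs[k] := by
  unfold pvCondA
  rw [PySem.List.pyGet?_natCast, List.getElem?_eq_getElem hk]
  simp [hk]

-- the forward accumulator invariant: after processing index k, last_punct represents exactly
-- the result of A's backward scan over (s, k]
theorem pvInvStep (cs : List Char) (s k : Nat) (L : Int)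
    (hk : k < cs.length) (hs : s ≤ k)
    (hP : pvScanA cs ((k : Int) - 1) (k - 1 - s) = (if (s : Int) < L then some L else none)) :
    pvScanA cs (k : Int) (k - s) =
      (if (s : Int) < (if pvPunctB.contains cs[k] ∧ (s : Int) < (k : Int) then (k : Int) else L)
       then some (if pvPunctB.contains cs[k] ∧ (s : Int) < (k : Int) then (k : Int) else L)
       else none) := by
  rcases Nat.eq_or_lt_of_le hs with heq | hlt
  · subst heq
    rw [if_neg (show ¬ (pvPunctB.contains cs[s] = true ∧ (s : Int) < (s : Int)) from
      fun h => lt_irrefl _ h.2)]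
    have h0 : s - s = 0 := by omega
    have h1 : s - 1 - s = 0 := by omega
    rw [h1, pvScanA] at hP
    rw [h0, pvScanA]
    exact hP
  · have hsk : (s : Int) < (k : Int) := by exact_mod_cast hlt
    have hcnt : k - s = (k - 1 - s) + 1 := by omega
    rw [hcnt, pvScanA, pvCondA_natCast cs k hk]
    by_cases hc : pvPunctA.contains cs[k]
    · rw [if_pos hc, if_pos (show pvPunctB.contains cs[k] ∧ (s : Int) < (k : Int) from ⟨hc, hsk⟩),
        if_pos hsk]
    · rw [if_neg hc,
        if_neg (show ¬ (pvPunctB.contains cs[k] ∧ (s : Int) < (k : Int)) from fun h => hc h.1)]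
      exact hP

-- enumerate unrolls one in-range position
theorem pvEnumDrop (cs : List Char) (k : Nat) (hk : k < cs.length) :
    (PySem.List.enumerate cs 0).drop k =
      ((k : Int), cs[k]) :: (PySem.List.enumerate cs 0).drop (k + 1) := by
  have hlen : k < (PySem.List.enumerate cs 0).length := by
    rw [PySem.List.length_enumerate]; exact hk
  rw [List.drop_eq_getElem_cons hlen, PySem.List.getElem_enumerate]
  norm_num

-- the heart: B's remaining fold (plus its final append) computes A's remaining while-loop,
-- for any segment start s and scan position k inside the current window
theorem pvMain (cs : List Char) (M : Nat) (hM : 1 ≤ M) :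
    ∀ (n k s : Nat) (L : Int) (acc : List String) (fuel : Nat),
      cs.length - k = n → s ≤ k → k ≤ s + M → k ≤ cs.length →
      pvScanA cs ((k : Int) - 1) (k - 1 - s) = (if (s : Int) < L then some L else none) →
      cs.length < s + fuel →
      (if ((( PySem.List.enumerate cs 0).drop k).foldl (pvStepB cs (M : Int)) (acc, (s : Int), L)).2.1 < (cs.length : Int) then
        (((PySem.List.enumerate cs 0).drop k).foldl (pvStepB cs (M : Int)) (acc, (s : Int), L)).1 ++
          [String.ofList (PySem.List.slice cs (some (((PySem.List.enumerate cs 0).drop k).foldl (pvStepB cs (M : Int)) (acc, (s : Int), L)).2.1) none)]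
      else (((PySem.List.enumerate cs 0).drop k).foldl (pvStepB cs (M : Int)) (acc, (s : Int), L)).1)
        = pvLoopA cs (M : Int) fuel (s : Int) acc := by
  intro n
  induction n using Nat.strong_induction_on with
  | _ n ih =>
    intro k s L acc fuel hn hsk hkM hklen hP hfuel
    by_cases hk : k < cs.length
    · -- one more character to fold
      rw [pvEnumDrop cs k hk, List.foldl_cons]
      simp only [pvStepB]
      have hstep := pvInvStep cs s k L hk hsk hP
      set L' := if pvPunctB.contains cs[k] ∧ (s : Int) < (k : Int) then (k : Int) else L with hL'
      by_cases hcut : k = s + M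
      · -- the window is full: B cuts here, A runs one pass of its while-loop
        subst hcut
        cases fuel with
        | zero => omega
        | succ f =>
          rw [if_pos (show ((s + M : Nat) : Int) = (s : Int) + (M : Int) by push_cast; ring)]
          rw [pvLoopA]
          have h1 : (s : Int) < (cs.length : Int) := by exact_mod_cast by omega
          have h2 : ¬ ((cs.length : Int) ≤ (s : Int) + (M : Int)) := by omega
          simp only [if_pos h1, if_neg h2]
          have hMM : s + M - s = M := by omega
          rw [hMM] at hstep
          have harg : ((s : Int) + (M : Int)) = ((s + M : Nat) : Int) := by push_cast; ring
          have harg2 : ((((s + M : Nat)) : Int) - (s : Int)).toNat = M := by push_cast; omega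
          rw [harg, harg2, hstep]
          by_cases hpos : (s : Int) < L'
          · -- a punctuation was seen in the window: both cut right after it
            rw [if_pos hpos, if_pos hpos]
            show _ = pvLoopA cs (M : Int) f (L' + 1)
              (acc ++ [String.ofList (PySem.List.slice cs (some (s : Int)) (some (L' + 1)))])
            have hsome : pvScanA cs ((s + M : Nat) : Int) M = some L' := by
              rw [hstep, if_pos hpos]
            have hb := pvScan_bounds cs L' M ((s + M : Nat) : Int) hsome
            set s' : Nat := L'.toNat + 1 with hs'
            have hL's : L' + 1 = (s' : Int) := by push_cast at hb ⊢; omega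
            rw [hL's]
            apply ih (cs.length - (s + M + 1)) (by omega) (s + M + 1) s' L' _ f rfl
            · push_cast at hb ⊢; omega
            · push_cast at hb ⊢; omega
            · omega
            · -- restart invariant: no punctuation strictly above L' in the scanned stretch
              rw [if_neg (show ¬ ((s' : Int) < L') by push_cast at hb ⊢; omega)]
              have ha1 : ((s + M + 1 : Nat) : Int) - 1 = ((s + M : Nat) : Int) := by push_cast; ring
              rw [ha1]
              exact pvScan_none cs L' _ M _ hsome (by push_cast at hb ⊢; omega)
            · omega
          · -- no punctuation: both cut at the bare window end
            rw [if_neg hpos, if_neg hpos]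
            show _ = pvLoopA cs (M : Int) f ((s + M : Nat) : Int)
              (acc ++ [String.ofList (PySem.List.slice cs (some (s : Int)) (some ((s + M : Nat) : Int)))])
            apply ih (cs.length - (s + M + 1)) (by omega) (s + M + 1) (s + M) L' _ f rfl
            · omega
            · omega
            · omega
            · rw [if_neg (show ¬ (((s + M : Nat) : Int) < L') by push_cast at hpos ⊢; omega)]
              have ha1 : ((s + M + 1 : Nat) : Int) - 1 = ((s + M : Nat) : Int) := by push_cast; ring
              have h0 : s + M + 1 - 1 - (s + M) = 0 := by omega
              rw [ha1, h0, pvScanA]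
            · omega
      · -- inside the window: B only updates last_punct, A's loop does not move yet
        rw [if_neg (show ¬ (((k : Nat) : Int) = (s : Int) + (M : Int)) by omega)]
        apply ih (cs.length - (k + 1)) (by omega) (k + 1) s L' acc fuel rfl
        · omega
        · omega
        · omega
        · have ha1 : ((k + 1 : Nat) : Int) - 1 = ((k : Nat) : Int) := by push_cast; ring
          have hc2 : k + 1 - 1 - s = k - s := by omega
          rw [ha1, hc2]
          exact hstep
        · omega
    · -- the text is exhausted: both sides append the tail (if any) and stop
      have hdrop : (PySem.List.enumerate cs 0).drop k = [] := by
        apply List.drop_eq_nil_of_le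
        rw [PySem.List.length_enumerate]; omega
      rw [hdrop, List.foldl_nil]
      cases fuel with
      | zero => omega
      | succ f =>
        rw [pvLoopA]
        by_cases hs : (s : Int) < (cs.length : Int)
        · simp only [if_pos hs, if_pos (show (cs.length : Int) ≤ (s : Int) + (M : Int) by omega)]
        · simp only [if_neg hs]

-- ===== VERDICT (by name: the statement is the Claim_ definition above) =====
theorem smart_text_segmentation_spec : Claim_equal_smart_text_segmentation := by
  intro text max_len _ hpre
  unfold Spec_smart_text_segmentation
  by_cases hle : (text.toList.length : Int) ≤ max_len
  · simp only [smart_text_segmentation, smart_text_segmentation_alt]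
    rw [if_pos hle, if_pos hle]
  · rcases hpre with h1 | h2 | h3
    · simp only [smart_text_segmentation, smart_text_segmentation_alt, if_neg hle]
      have hM : max_len = ((max_len.toNat : Nat) : Int) := by omega
      rw [hM]
      have := pvMain text.toList max_len.toNat (by omega)
        text.toList.length 0 0 (-1) [] (text.toList.length + 1) (by omega) (by omega)
        (by omega) (by omega) (by rw [pvScanA]; norm_num) (by omega)
      simpa using this.symm
    · exact absurd h2 hle
    · -- empty text, negative max_len: A's and B's loops both run zero passes
      simp only [smart_text_segmentation, smart_text_segmentation_alt, h3]
      norm_num [pvLoopA, PySem.List.enumerate]
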